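-- pv_equiv track=rewrite | github.com/cielavenir/checkio | sendgrid/node-crucial.py | most_crucial
-- ===== SOURCE A (Python) =====
-- from collections import defaultdict
--
-- class union_find:
-- 	def __init__(self):
-- 		self.parent={}
-- 	def root(self,a):
-- 		if a not in self.parent: self.parent[a]=a
-- 		if self.parent[a]!=a: self.parent[a]=self.root(self.parent[a])
-- 		return self.parent[a]
-- 	def unite(self,a,b):
-- 		x=self.root(a)
-- 		y=self.root(b)
-- 		self.parent[x]=y
-- 	def size(self):
-- 		return len(set(self.root(e) for e in self.parent))
--
-- def most_crucial(a,_v):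
-- 	retv=[float('inf'),float('inf')]
-- 	ret=[]
-- 	for v in _v:
-- 		uf=union_find()
-- 		for x,y in a:
-- 			uf.root(x)
-- 			uf.root(y)
-- 			if x!=v and y!=v:
-- 				uf.unite(x,y)
-- 		r=defaultdict(int)
-- 		for w in _v:
-- 			r[uf.root(w)]+=_v[w]
-- 		xretv=sum(e**2 for e in r.values())
-- 		if retv[0]>xretv or (retv[0]==xretv and _v[v]>retv[1]):
-- 			retv=[xretv,_v[v]]
-- 			ret=[]
-- 		if retv[0]==xretv and _v[v]==retv[1]:
-- 			ret.append(v)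
-- 	return ret
-- ===== SOURCE B (Python) =====
-- def most_crucial(a, _v):
--     scores = []
--     for v in _v:
--         comp = {}
--         for x, y in a:
--             comp.setdefault(x, x)
--             comp.setdefault(y, y)
--             if x != v and y != v:
--                 lx, ly = comp[x], comp[y]
--                 if lx != ly:
--                     comp = {k: (ly if c == lx else c) for k, c in comp.items()}
--         weight = {}
--         for w in _v:
--             c = comp.get(w, w)
--             weight[c] = weight.get(c, 0) + _v[w]
--         scores.append((sum(t * t for t in weight.values()), _v[v], v))
--     if not scores:
--         return []
--     best_s = min(s for s, _, _ in scores)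
--     best_w = max(w for s, w, _ in scores if s == best_s)
--     return [v for s, w, v in scores if s == best_s and w == best_w]
-- ===== Notes on version B (the rewrite author's own statement) =====
-- stated objective: alternative
-- what changed: A rebuilds a recursive path-compressing union-find per candidate vertex and tracks the running best with an inf-sentinel accumulator; B instead propagates eager component labels over the edges (a flat relabel map, no parent forest, no recursion), collects all (score, weight, vertex) triples, and selects the result with min/max/filter passes.
import Mathlib
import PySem

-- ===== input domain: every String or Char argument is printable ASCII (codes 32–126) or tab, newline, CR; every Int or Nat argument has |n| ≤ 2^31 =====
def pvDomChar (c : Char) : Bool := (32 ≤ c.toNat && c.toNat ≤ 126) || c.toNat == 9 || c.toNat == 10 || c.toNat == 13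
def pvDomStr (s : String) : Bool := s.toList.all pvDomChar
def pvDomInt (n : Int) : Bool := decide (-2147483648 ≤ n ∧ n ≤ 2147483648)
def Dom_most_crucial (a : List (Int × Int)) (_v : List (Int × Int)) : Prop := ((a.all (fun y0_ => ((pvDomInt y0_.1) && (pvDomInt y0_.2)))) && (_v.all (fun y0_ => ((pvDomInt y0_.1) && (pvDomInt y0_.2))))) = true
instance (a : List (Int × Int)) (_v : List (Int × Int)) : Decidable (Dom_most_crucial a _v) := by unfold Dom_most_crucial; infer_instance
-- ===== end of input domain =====

-- B replaces A's per-candidate union-find (recursive root with path compression) by per-candidate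
-- eager label propagation plus a min/max/filter selection pass; alternative structure, same values.

-- ===== PORT A =====
-- union_find.root with path compression; fuel only guards termination (chains are finite in every
-- reachable state; fuel = |a|+1 is proved sufficient below)
def ufRoot (fuel : Nat) (p : PySem.Dict Int Int) (a : Int) : PySem.Dict Int Int × Int :=
  match fuel with
  | 0 => (p, a)
  | fuel + 1 =>
    let p1 := if p.contains a then p else p.insert a a        -- if a not in parent: parent[a]=a
    if p1.getD a a ≠ a then                                   -- if parent[a]!=a
      let pr := ufRoot fuel p1 (p1.getD a a)                  --   root(parent[a])
      let p3 := pr.1.insert a pr.2                            --   parent[a]=...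
      (p3, p3.getD a a)                                       -- return parent[a]
    else (p1, p1.getD a a)

def ufUnite (fuel : Nat) (p : PySem.Dict Int Int) (x y : Int) : PySem.Dict Int Int :=
  let prx := ufRoot fuel p x
  let pry := ufRoot fuel prx.1 y
  pry.1.insert prx.2 pry.2

def ufEdgeStep (fuel : Nat) (v : Int) (p : PySem.Dict Int Int) (e : Int × Int) : PySem.Dict Int Int :=
  let p1 := (ufRoot fuel p e.1).1
  let p2 := (ufRoot fuel p1 e.2).1
  if e.1 ≠ v ∧ e.2 ≠ v then ufUnite fuel p2 e.1 e.2 else p2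

-- r[uf.root(w)] += _v[w]  (r is a defaultdict(int))
def ufGroupStep (fuel : Nat) (d : PySem.Dict Int Int)
    (s : PySem.Dict Int Int × PySem.Dict Int Int) (w : Int) :
    PySem.Dict Int Int × PySem.Dict Int Int :=
  let pr := ufRoot fuel s.1 w
  (pr.1, s.2.modify pr.2 0 (· + d.getD w 0))

def ufScore (fuel : Nat) (a : List (Int × Int)) (d : PySem.Dict Int Int) (v : Int) : Int :=
  let p := a.foldl (ufEdgeStep fuel v) PySem.Dict.empty
  let r := (d.keys.foldl (ufGroupStep fuel d) (p, PySem.Dict.empty)).2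
  (r.values.map (fun e => e * e)).sum

-- one iteration of A's outer loop; retv = none models the initial [inf, inf]
def ufOuterStep (fuel : Nat) (a : List (Int × Int)) (d : PySem.Dict Int Int)
    (st : Option (Int × Int) × List Int) (v : Int) : Option (Int × Int) × List Int :=
  let xretv := ufScore fuel a d v
  let wv := d.getD v 0
  let st1 := match st.1 with
    | none => (some (xretv, wv), ([] : List Int))
    | some bb => if bb.1 > xretv ∨ (bb.1 = xretv ∧ wv > bb.2) then (some (xretv, wv), ([] : List Int)) else st
  match st1.1 with
  | some bb => if bb.1 = xretv ∧ bb.2 = wv then (st1.1, st1.2 ++ [v]) else st1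
  | none => st1

def most_crucial (a : List (Int × Int)) (_v : List (Int × Int)) : List Int :=
  let d := PySem.Dict.ofList _v
  (d.keys.foldl (ufOuterStep (a.length + 1) a d) (none, [])).2

-- ===== PORT B =====
-- comp = {k: (ly if c == lx else c) for k, c in comp.items()}
def relabelStep (v : Int) (m : PySem.Dict Int Int) (e : Int × Int) : PySem.Dict Int Int :=
  let m1 := m.setdefault e.1 e.1
  let m2 := m1.setdefault e.2 e.2
  if e.1 ≠ v ∧ e.2 ≠ v then
    let lx := m2.getD e.1 e.1
    let ly := m2.getD e.2 e.2
    if lx ≠ ly then PySem.Dict.mk (m2.items.map (fun kl => (kl.1, if kl.2 = lx then ly else kl.2)))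
    else m2
  else m2

def altTriple (a : List (Int × Int)) (d : PySem.Dict Int Int) (v : Int) : Int × Int × Int :=
  let comp := a.foldl (relabelStep v) PySem.Dict.empty
  let weight := d.keys.foldl (fun (wt : PySem.Dict Int Int) w =>
      let c := comp.getD w w
      wt.insert c (wt.getD c 0 + d.getD w 0)) PySem.Dict.empty
  ((weight.values.map (fun t => t * t)).sum, d.getD v 0, v)

def most_crucial_alt (a : List (Int × Int)) (_v : List (Int × Int)) : List Int :=
  let d := PySem.Dict.ofList _v
  let scores := d.keys.map (altTriple a d)
  if scores = [] then []
  else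
    match PySem.List.min? (scores.map (·.1)) id with
    | none => []
    | some bs =>
      match PySem.List.max? ((scores.filter (fun t => decide (t.1 = bs))).map (fun t => t.2.1)) id with
      | none => []
      | some bw => (scores.filter (fun t => decide (t.1 = bs ∧ t.2.1 = bw))).map (fun t => t.2.2)

-- ===== PRECONDITION & SPEC =====
def Spec_most_crucial (a : List (Int × Int)) (_v : List (Int × Int)) (out : List Int) : Prop := out = most_crucial_alt a _v
instance (a : List (Int × Int)) (_v : List (Int × Int)) (out : List Int) : Decidable (Spec_most_crucial a _v out) := by unfold Spec_most_crucial; infer_instance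

-- ===== CLAIM (what is proved, stated in full; the proofs are below) =====
def Claim_equal_most_crucial : Prop := ∀ (a : List (Int × Int)) (_v : List (Int × Int)), Dom_most_crucial a _v → Spec_most_crucial a _v (most_crucial a _v)

-- ===== LEMMAS AND PROOFS =====

-- the parent-following function of a union-find state, its iteration, roots and limits
def ufF (p : PySem.Dict Int Int) (k : Int) : Int := p.getD k k

def ufIter (p : PySem.Dict Int Int) : Nat → Int → Int
  | 0, k => k
  | n + 1, k => ufIter p n (ufF p k)

def ufIsRoot (p : PySem.Dict Int Int) (r : Int) : Prop := ufF p r = r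

-- k reaches root r within c parent steps
def ufLimB (p : PySem.Dict Int Int) (c : Nat) (k r : Int) : Prop :=
  ∃ j, j ≤ c ∧ ufIter p j k = r ∧ ufIsRoot p r

def ufPres (p p' : PySem.Dict Int Int) : Prop :=
  ∀ c k r, ufLimB p c k r → ufLimB p' c k r

def pvLab (m : PySem.Dict Int Int) (k : Int) : Int := m.getD k k

def coupled (c : Nat) (p m : PySem.Dict Int Int) : Prop := ∀ k, ufLimB p c k (pvLab m k)

def labClosed (m : PySem.Dict Int Int) : Prop :=
  ∀ k, m.contains k = true → m.contains (m.getD k k) = true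

lemma ufIter_absorb (p : PySem.Dict Int Int) (r : Int) (hr : ufIsRoot p r) :
    ∀ j, ufIter p j r = r := by
  intro j; induction j with
  | zero => rfl
  | succ n ih => unfold ufIsRoot at hr; simpa [ufIter, hr] using ih

lemma ufIter_add (p : PySem.Dict Int Int) (j i : Nat) (k : Int) :
    ufIter p (j + i) k = ufIter p i (ufIter p j k) := by
  induction j generalizing k with
  | zero => simp [ufIter]
  | succ n ih => simpa [ufIter, Nat.succ_add] using ih (ufF p k)

lemma ufLim_unique (p : PySem.Dict Int Int) {j j' : Nat} {k r r' : Int}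
    (h1 : ufIter p j k = r) (hr : ufIsRoot p r)
    (h2 : ufIter p j' k = r') (hr' : ufIsRoot p r') : r = r' := by
  rcases Nat.le_total j j' with h | h
  · obtain ⟨i, rfl⟩ := Nat.le.dest h
    rw [ufIter_add, h1, ufIter_absorb p r hr] at h2; exact h2
  · obtain ⟨i, rfl⟩ := Nat.le.dest h
    rw [ufIter_add, h2, ufIter_absorb p r' hr'] at h1; exact h1.symm

lemma ufF_insert (p : PySem.Dict Int Int) (a b k : Int) :
    ufF (p.insert a b) k = if k = a then b else ufF p k := by
  simp [ufF, PySem.Dict.getD_insert]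

lemma ufIter_congr {p p' : PySem.Dict Int Int} (h : ∀ k, ufF p k = ufF p' k) :
    ∀ j k, ufIter p j k = ufIter p' j k := by
  intro j; induction j with
  | zero => intro k; rfl
  | succ n ih => intro k; simp [ufIter, h, ih]

lemma ufPres_of_congr {p p' : PySem.Dict Int Int} (h : ∀ k, ufF p k = ufF p' k) :
    ufPres p p' := by
  rintro c k r ⟨j, hj, hit, hr⟩
  exact ⟨j, hj, by rw [← ufIter_congr h, hit], by unfold ufIsRoot at *; rw [← h, hr]⟩

lemma ufF_self_insert {p : PySem.Dict Int Int} {a : Int} (h : ufF p a = a) :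
    ∀ k, ufF p k = ufF (p.insert a a) k := by
  intro k; rw [ufF_insert]; split <;> simp_all
lemma ufIter_compress {p : PySem.Dict Int Int} {a r : Int} {jr : Nat}
    (hlim : ufIter p jr a = r) (hr : ufIsRoot p r) (hne : a ≠ r) :
    ∀ j k L, ufIter p j k = L → ufIsRoot p L →
      ∃ j' ≤ j, ufIter (p.insert a r) j' k = L ∧ ufIsRoot (p.insert a r) L := by
  intro j
  induction j with
  | zero =>
    intro k L hit hL
    have hkL : k = L := hit
    subst hkL
    have hka : k ≠ a := by
      rintro rfl
      exact hne (ufLim_unique p (j := 0) (j' := jr) (k := k) rfl hL hlim hr)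
    exact ⟨0, le_refl _, rfl, by unfold ufIsRoot at *; rw [ufF_insert]; simp [hka, hL]⟩
  | succ n ih =>
    intro k L hit hL
    by_cases hka : k = a
    · subst hka
      have hLr : L = r := ufLim_unique p hit hL hlim hr
      refine ⟨1, by omega, ?_, ?_⟩
      · show ufIter (p.insert k r) 0 (ufF (p.insert k r) k) = L
        rw [ufF_insert]; simp [hLr, ufIter]
      · unfold ufIsRoot at *; rw [ufF_insert]; simp [hLr, Ne.symm hne, hr]
    · have hstep : ufIter p n (ufF p k) = L := hit
      obtain ⟨j', hj', hit', hL'⟩ := ih (ufF p k) L hstep hL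
      refine ⟨j' + 1, by omega, ?_, hL'⟩
      show ufIter (p.insert a r) j' (ufF (p.insert a r) k) = L
      rw [ufF_insert]; simp only [if_neg hka]; exact hit'

lemma ufPres_compress {p : PySem.Dict Int Int} {c : Nat} {a r : Int}
    (h : ufLimB p c a r) : ufPres p (p.insert a r) := by
  obtain ⟨jr, hjr, hlim, hr⟩ := h
  by_cases hne : a = r
  · subst hne
    unfold ufIsRoot at hr
    exact ufPres_of_congr (ufF_self_insert hr)
  · rintro c' k L ⟨j, hj, hit, hL⟩
    obtain ⟨j', hj', hit', hL'⟩ := ufIter_compress hlim hr hne j k L hit hL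
    exact ⟨j', le_trans hj' hj, hit', hL'⟩

lemma ufIter_unite_hit {p : PySem.Dict Int Int} {rx ry : Int}
    (hrx : ufIsRoot p rx) (hry : ufIsRoot p ry) (hne : rx ≠ ry) :
    ∀ j k, ufIter p j k = rx → ufIter (p.insert rx ry) (j + 1) k = ry := by
  have hry' : ufIsRoot (p.insert rx ry) ry := by
    unfold ufIsRoot at *; rw [ufF_insert]; simp [Ne.symm hne, hry]
  intro j
  induction j with
  | zero =>
    intro k hit
    have : k = rx := hit
    subst this
    show ufIter (p.insert k ry) 0 (ufF (p.insert k ry) k) = ry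
    rw [ufF_insert]; simp [ufIter]
  | succ n ih =>
    intro k hit
    by_cases hk : k = rx
    · subst hk
      show ufIter (p.insert k ry) (n + 1) (ufF (p.insert k ry) k) = ry
      rw [ufF_insert, if_pos rfl]
      exact ufIter_absorb _ _ hry' (n + 1)
    · have hstep : ufIter p n (ufF p k) = rx := hit
      have := ih (ufF p k) hstep
      show ufIter (p.insert rx ry) (n + 1) (ufF (p.insert rx ry) k) = ry
      rw [ufF_insert]; simp only [if_neg hk]; exact this

lemma ufIter_unite_miss {p : PySem.Dict Int Int} {rx ry : Int}
    (hrx : ufIsRoot p rx) :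
    ∀ j k L, ufIter p j k = L → ufIsRoot p L → L ≠ rx →
      ufIter (p.insert rx ry) j k = L ∧ ufIsRoot (p.insert rx ry) L := by
  intro j
  induction j with
  | zero =>
    intro k L hit hL hne
    have : k = L := hit
    subst this
    exact ⟨rfl, by unfold ufIsRoot at *; rw [ufF_insert]; simp [hne, hL]⟩
  | succ n ih =>
    intro k L hit hL hne
    by_cases hk : k = rx
    · exfalso
      subst hk
      have : ufIter p (n + 1) k = k := by
        have : ufF p k = k := hrx
        show ufIter p n (ufF p k) = k
        rw [this]; exact ufIter_absorb p k hrx n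
      exact hne (by rw [← hit, this])
    · have hstep : ufIter p n (ufF p k) = L := hit
      obtain ⟨hit', hL'⟩ := ih (ufF p k) L hstep hL hne
      refine ⟨?_, hL'⟩
      show ufIter (p.insert rx ry) n (ufF (p.insert rx ry) k) = L
      rw [ufF_insert]; simp only [if_neg hk]; exact hit'
lemma ufRoot_spec : ∀ (fuel : Nat) (p : PySem.Dict Int Int) (a r : Int) (j : Nat),
    j < fuel → ufIter p j a = r → ufIsRoot p r →
    (ufRoot fuel p a).2 = r ∧ ufPres p (ufRoot fuel p a).1 := by
  intro fuel
  induction fuel with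
  | zero => intro p a r j hj; omega
  | succ fuel ih =>
    intro p a r j hj hit hr
    set p1 := if p.contains a then p else p.insert a a with hp1
    have hcong : ∀ k, ufF p k = ufF p1 k := by
      intro k
      by_cases hc : p.contains a
      · simp [hp1, hc]
      · have ha : ufF p a = a := by
          unfold ufF
          exact PySem.Dict.getD_of_not_contains p a (by simpa using hc)
        simp only [hp1, Bool.not_eq_true] at *
        rw [if_neg (by simp [hc])]
        exact ufF_self_insert ha k
    have pres01 : ufPres p p1 := ufPres_of_congr hcong
    have hit1 : ufIter p1 j a = r := by rw [← ufIter_congr hcong]; exact hit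
    have hr1 : ufIsRoot p1 r := by unfold ufIsRoot at *; rw [← hcong]; exact hr
    by_cases hpa : p1.getD a a ≠ a
    · -- recursive branch
      have hj0 : j ≠ 0 := by
        rintro rfl
        have : a = r := hit1
        apply hpa
        subst this
        exact hr1
      obtain ⟨jj, rfl⟩ := Nat.exists_eq_succ_of_ne_zero hj0
      have hit1' : ufIter p1 jj (ufF p1 a) = r := hit1
      have hpa' : ufF p1 a = p1.getD a a := rfl
      obtain ⟨hval, pres12⟩ := ih p1 (p1.getD a a) r jj (by omega) (by rw [← hpa']; exact hit1') hr1
      have hlim2 : ufLimB (ufRoot fuel p1 (p1.getD a a)).1 (jj + 1) a r :=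
        pres12 (jj + 1) a r ⟨jj + 1, le_refl _, hit1, hr1⟩
      have pres23 := ufPres_compress hlim2
      constructor
      · show (ufRoot (fuel + 1) p a).2 = r
        simp only [ufRoot, ← hp1, if_pos hpa]
        rw [hval]
        simp [PySem.Dict.getD_eq_get?_getD, PySem.Dict.get?_insert_self]
      · show ufPres p (ufRoot (fuel + 1) p a).1
        simp only [ufRoot, ← hp1, if_pos hpa]
        rw [hval]
        intro c k L h
        exact pres23 c k L (pres12 c k L (pres01 c k L h))
    · -- parent[a] == a
      rw [not_not] at hpa
      have hra : ufIsRoot p1 a := hpa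
      have hr_a : r = a := ufLim_unique p1 hit1 hr1 (j' := 0) rfl hra
      constructor
      · show (ufRoot (fuel + 1) p a).2 = r
        simp only [ufRoot, ← hp1, if_neg (not_not_intro hpa)]
        rw [hpa, hr_a]
      · show ufPres p (ufRoot (fuel + 1) p a).1
        simp only [ufRoot, ← hp1, if_neg (not_not_intro hpa)]
        exact pres01
lemma relabel_get? (m : PySem.Dict Int Int) (g : Int → Int) (k : Int) :
    (PySem.Dict.mk (m.items.map (fun kl => (kl.1, g kl.2)))).get? k = (m.get? k).map g := by
  show Option.map _ (List.find? _ _) = Option.map g (Option.map _ (List.find? _ _))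
  rw [List.find?_map]
  have hp : ((fun (p : Int × Int) => p.1 == k) ∘ (fun kl : Int × Int => (kl.1, g kl.2)))
      = (fun p : Int × Int => p.1 == k) := rfl
  rw [hp]
  cases List.find? (fun p : Int × Int => p.1 == k) m.items with
  | none => rfl
  | some q => cases q; rfl

lemma relabel_contains (m : PySem.Dict Int Int) (g : Int → Int) (k : Int) :
    (PySem.Dict.mk (m.items.map (fun kl => (kl.1, g kl.2)))).contains k = m.contains k := by
  show (List.map _ m.items).any _ = m.items.any _
  rw [List.any_map]
  rfl
lemma ufLimB_mono {p : PySem.Dict Int Int} {c c' : Nat} {k r : Int} (h : c ≤ c')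
    (hl : ufLimB p c k r) : ufLimB p c' k r := by
  obtain ⟨j, hj, hit, hr⟩ := hl
  exact ⟨j, le_trans hj h, hit, hr⟩

lemma coupled_pres {c : Nat} {p p' m : PySem.Dict Int Int} (hp : ufPres p p')
    (h : coupled c p m) : coupled c p' m := fun k => hp c k _ (h k)

lemma pvLab_setdefault (m : PySem.Dict Int Int) (t k : Int) :
    pvLab (m.setdefault t t) k = pvLab m k := by
  by_cases hk : k = t
  · subst hk; exact PySem.Dict.getD_setdefault_self m k k k
  · unfold pvLab
    rw [PySem.Dict.getD_eq_get?_getD, PySem.Dict.get?_setdefault_of_ne m t hk,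
      ← PySem.Dict.getD_eq_get?_getD]

lemma labClosed_setdefault {m : PySem.Dict Int Int} (t : Int) (hl : labClosed m) :
    labClosed (m.setdefault t t) := by
  intro k hk
  have hlab : (m.setdefault t t).getD k k = pvLab m k := pvLab_setdefault m t k
  rw [hlab, PySem.Dict.contains_setdefault]
  by_cases hmk : m.contains k = true
  · simp only [Bool.or_eq_true, beq_iff_eq]
    exact Or.inr (hl k hmk)
  · rw [PySem.Dict.contains_setdefault] at hk
    simp [hmk] at hk
    subst hk
    unfold pvLab
    rw [PySem.Dict.getD_of_not_contains m k (by simpa using hmk)]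
    simp

lemma edge_step (fuel c : Nat) (v : Int) (e : Int × Int) (p m : PySem.Dict Int Int)
    (hc : coupled c p m) (hl : labClosed m) (hfuel : c < fuel) :
    coupled (c + 1) (ufEdgeStep fuel v p e) (relabelStep v m e) ∧ labClosed (relabelStep v m e) := by
  obtain ⟨x, y⟩ := e
  -- B side: the two setdefaults change no label
  set m2 := (m.setdefault x x).setdefault y y with hm2
  have hlab2 : ∀ k, pvLab m2 k = pvLab m k := by
    intro k; rw [hm2, pvLab_setdefault, pvLab_setdefault]
  have hl2 : labClosed m2 := labClosed_setdefault y (labClosed_setdefault x hl)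
  have hcont2x : m2.contains x = true := by
    rw [hm2, PySem.Dict.contains_setdefault, PySem.Dict.contains_setdefault]; simp
  have hcont2y : m2.contains y = true := by
    rw [hm2, PySem.Dict.contains_setdefault]; simp
  -- A side: the two reads preserve everything
  obtain ⟨j1, hj1, hit1, hr1⟩ := hc x
  obtain ⟨-, pres1⟩ := ufRoot_spec fuel p x _ j1 (lt_of_le_of_lt hj1 hfuel) hit1 hr1
  have hc1 : coupled c (ufRoot fuel p x).1 m := coupled_pres pres1 hc
  obtain ⟨j2, hj2, hit2, hr2⟩ := hc1 y
  obtain ⟨-, pres2⟩ := ufRoot_spec fuel _ y _ j2 (lt_of_le_of_lt hj2 hfuel) hit2 hr2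
  have hc2 : coupled c (ufRoot fuel (ufRoot fuel p x).1 y).1 m := coupled_pres pres2 hc1
  set p2 := (ufRoot fuel (ufRoot fuel p x).1 y).1 with hp2
  show coupled (c + 1) (ufEdgeStep fuel v p (x, y)) (relabelStep v m (x, y)) ∧ _
  unfold ufEdgeStep relabelStep
  by_cases hguard : x ≠ v ∧ y ≠ v
  · simp only [if_pos hguard, ← hp2, ← hm2]
    -- unite: two more root calls then parent[rx] = ry
    obtain ⟨j3, hj3, hit3, hr3⟩ := hc2 x
    obtain ⟨hval3, pres3⟩ := ufRoot_spec fuel p2 x _ j3 (lt_of_le_of_lt hj3 hfuel) hit3 hr3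
    have hc3 : coupled c (ufRoot fuel p2 x).1 m := coupled_pres pres3 hc2
    obtain ⟨j4, hj4, hit4, hr4⟩ := hc3 y
    obtain ⟨hval4, pres4⟩ := ufRoot_spec fuel _ y _ j4 (lt_of_le_of_lt hj4 hfuel) hit4 hr4
    have hc4 : coupled c (ufRoot fuel (ufRoot fuel p2 x).1 y).1 m := coupled_pres pres4 hc3
    set p4 := (ufRoot fuel (ufRoot fuel p2 x).1 y).1 with hp4
    have hlx : m2.getD x x = pvLab m x := hlab2 x
    have hly : m2.getD y y = pvLab m y := hlab2 y
    set lX := pvLab m x with hlX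
    set lY := pvLab m y with hlY
    have hrootX : ufIsRoot p4 lX := by
      obtain ⟨-, -, -, hr⟩ := hc4 x; exact hr
    have hrootY : ufIsRoot p4 lY := by
      obtain ⟨-, -, -, hr⟩ := hc4 y; exact hr
    have hcontlX : m2.contains lX = true := by
      have := hl2 x hcont2x
      rwa [show m2.getD x x = lX from hlx] at this
    have hcontlY : m2.contains lY = true := by
      have := hl2 y hcont2y
      rwa [show m2.getD y y = lY from hly] at this
    unfold ufUnite
    simp only [hval3, hval4, ← hp4, hlx, hly]
    by_cases hxy : lX = lY
    · -- equal roots: A inserts a self-loop, B keeps m2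
      rw [if_neg (not_not_intro hxy)]
      have presS : ufPres p4 (p4.insert lX lY) := by
        rw [hxy]; exact ufPres_of_congr (ufF_self_insert hrootY)
      refine ⟨fun k => ufLimB_mono (Nat.le_succ c) ?_, hl2⟩
      have := coupled_pres presS hc4 k
      rwa [← hlab2 k] at this
    · simp only [if_pos hxy]
      -- the relabelled dict: every label goes through g
      set g : Int → Int := fun t => if t = lX then lY else t with hg
      set m3 := PySem.Dict.mk (m2.items.map (fun kl => (kl.1, g kl.2))) with hm3
      have hlab3 : ∀ k, pvLab m3 k = g (pvLab m2 k) := by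
        intro k
        unfold pvLab
        rw [hm3, PySem.Dict.getD_eq_get?_getD, relabel_get?]
        cases hq : m2.get? k with
        | some q => simp [PySem.Dict.getD_eq_get?_getD, hq]
        | none =>
          have hnc : m2.contains k = false := by
            rw [PySem.Dict.contains_eq_isSome_get?, hq]; rfl
          have hkn : k ≠ lX := by
            rintro rfl; rw [hnc] at hcontlX; cases hcontlX
          simp [PySem.Dict.getD_eq_get?_getD, hq, hg, hkn]
      constructor
      · -- coupling after parent[lX] := lY / the relabel
        intro k
        obtain ⟨j, hj, hit, hr⟩ := hc4 k
        rw [hlab3 k, hlab2 k]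
        by_cases hkX : pvLab m k = lX
        · rw [hkX] at hit hr ⊢
          simp only [hg, if_pos rfl]
          exact ⟨j + 1, by omega, ufIter_unite_hit hrootX hrootY hxy j k hit, by
            unfold ufIsRoot at *; rw [ufF_insert]; simp [Ne.symm hxy, hrootY]⟩
        · simp only [hg, if_neg hkX]
          obtain ⟨hit', hr'⟩ := ufIter_unite_miss hrootX j k _ hit hr hkX
          exact ⟨j, by omega, hit', hr'⟩
      · -- labClosed for the relabelled dict
        intro k hk
        rw [hm3, relabel_contains] at hk ⊢
        show m2.contains (pvLab m3 k) = true
        rw [hlab3 k]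
        by_cases hkX : pvLab m2 k = lX
        · simp only [hg, hkX, if_pos rfl]; exact hcontlY
        · simp only [hg, if_neg hkX]; exact hl2 k hk
  · simp only [if_neg hguard, ← hp2, ← hm2]
    refine ⟨fun k => ufLimB_mono (Nat.le_succ c) ?_, hl2⟩
    have := hc2 k
    rwa [← hlab2 k] at this
lemma edges_fold (fuel : Nat) (v : Int) :
    ∀ (es : List (Int × Int)) (c : Nat) (p m : PySem.Dict Int Int),
      coupled c p m → labClosed m → c + es.length < fuel →
      coupled (c + es.length) (es.foldl (ufEdgeStep fuel v) p) (es.foldl (relabelStep v) m) ∧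
        labClosed (es.foldl (relabelStep v) m) := by
  intro es
  induction es with
  | nil => intro c p m hc hl _; exact ⟨by simpa using hc, hl⟩
  | cons e es ih =>
    intro c p m hc hl hlen
    obtain ⟨hc', hl'⟩ := edge_step fuel c v e p m hc hl (by simp at hlen; omega)
    have := ih (c + 1) _ _ hc' hl' (by simp at hlen ⊢; omega)
    simpa [List.foldl_cons, Nat.add_assoc, Nat.add_comm 1 es.length] using this

lemma group_fold (fuel c : Nat) (hcf : c < fuel) (d m : PySem.Dict Int Int) :
    ∀ (ws : List Int) (p wt : PySem.Dict Int Int), coupled c p m →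
      (ws.foldl (ufGroupStep fuel d) (p, wt)).2 =
        ws.foldl (fun (wt : PySem.Dict Int Int) w =>
          let c := m.getD w w
          wt.insert c (wt.getD c 0 + d.getD w 0)) wt := by
  intro ws
  induction ws with
  | nil => intro p wt _; rfl
  | cons w ws ih =>
    intro p wt hc
    obtain ⟨j, hj, hit, hr⟩ := hc w
    obtain ⟨hval, pres⟩ := ufRoot_spec fuel p w _ j (lt_of_le_of_lt hj hcf) hit hr
    have hc' : coupled c (ufRoot fuel p w).1 m := coupled_pres pres hc
    have hstep : ufGroupStep fuel d (p, wt) w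
        = ((ufRoot fuel p w).1, wt.insert (pvLab m w) (wt.getD (pvLab m w) 0 + d.getD w 0)) := by
      simp only [ufGroupStep, PySem.Dict.modify, hval]
    rw [List.foldl_cons, hstep, ih _ _ hc']
    rfl

lemma coupled_empty : coupled 0 PySem.Dict.empty PySem.Dict.empty := by
  intro k
  refine ⟨0, le_refl _, rfl, ?_⟩
  unfold ufIsRoot ufF
  rw [PySem.Dict.getD_empty]

lemma labClosed_empty : labClosed PySem.Dict.empty := by
  intro k hk
  rw [PySem.Dict.contains_empty] at hk
  cases hk

lemma score_eq (a : List (Int × Int)) (d : PySem.Dict Int Int) (v : Int) :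
    ufScore (a.length + 1) a d v = (altTriple a d v).1 := by
  obtain ⟨hcoup, -⟩ := edges_fold (a.length + 1) v a 0 PySem.Dict.empty PySem.Dict.empty
    coupled_empty labClosed_empty (by omega)
  rw [Nat.zero_add] at hcoup
  simp only [ufScore, altTriple]
  rw [group_fold (a.length + 1) a.length (by omega) d _ d.keys _ PySem.Dict.empty hcoup]
def selStep (st : Option (Int × Int) × List Int) (t : Int × Int × Int) :
    Option (Int × Int) × List Int :=
  let st1 := match st.1 with
    | none => (some (t.1, t.2.1), ([] : List Int))
    | some bb => if bb.1 > t.1 ∨ (bb.1 = t.1 ∧ t.2.1 > bb.2) then (some (t.1, t.2.1), ([] : List Int)) else st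
  match st1.1 with
  | some bb => if bb.1 = t.1 ∧ bb.2 = t.2.1 then (st1.1, st1.2 ++ [t.2.2]) else st1
  | none => st1

lemma outer_step_eq (a : List (Int × Int)) (d : PySem.Dict Int Int)
    (st : Option (Int × Int) × List Int) (v : Int) :
    ufOuterStep (a.length + 1) a d st v = selStep st (altTriple a d v) := by
  have h1 : (altTriple a d v).1 = ufScore (a.length + 1) a d v := (score_eq a d v).symm
  have h2 : (altTriple a d v).2.1 = d.getD v 0 := rfl
  have h3 : (altTriple a d v).2.2 = v := rfl
  simp only [ufOuterStep, selStep, h1, h2, h3]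

lemma min?_append_singleton {α : Type} (xs : List α) (x : α) (key : α → Int) :
    PySem.List.min? (xs ++ [x]) key =
      (match PySem.List.min? xs key with
        | none => some x
        | some m => if key x < key m then some x else some m) := by
  unfold PySem.List.min?
  rw [List.foldl_append]
  rfl

lemma max?_append_singleton {α : Type} (xs : List α) (x : α) (key : α → Int) :
    PySem.List.max? (xs ++ [x]) key =
      (match PySem.List.max? xs key with
        | none => some x
        | some m => if key m < key x then some x else some m) := by
  unfold PySem.List.max?
  rw [List.foldl_append]
  rfl

lemma sel_invariant : ∀ (ts : List (Int × Int × Int)), ts ≠ [] →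
    ∃ bs bw,
      PySem.List.min? (ts.map (·.1)) id = some bs ∧
      PySem.List.max? ((ts.filter (fun t => decide (t.1 = bs))).map (fun t => t.2.1)) id = some bw ∧
      ts.foldl selStep (none, ([] : List Int)) =
        (some (bs, bw), (ts.filter (fun t => decide (t.1 = bs ∧ t.2.1 = bw))).map (fun t => t.2.2)) := by
  intro ts
  induction ts using List.reverseRecOn with
  | nil => intro h; exact absurd rfl h
  | append_singleton ts t ih =>
    intro _
    rcases eq_or_ne ts [] with rfl | hne
    · refine ⟨t.1, t.2.1, rfl, ?_, ?_⟩
      · simp [PySem.List.max?]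
      · simp [selStep]
    · obtain ⟨bs, bw, hmin, hmax, hfold⟩ := ih hne
      have hminle : ∀ u ∈ ts, bs ≤ u.1 := by
        intro u hu
        have := PySem.List.min?_isMin hmin (u.1) (List.mem_map_of_mem hu)
        simpa using this
      have hmaxle : ∀ u ∈ ts, u.1 = bs → u.2.1 ≤ bw := by
        intro u hu h1
        have hu' : u ∈ ts.filter (fun t => decide (t.1 = bs)) :=
          List.mem_filter.2 ⟨hu, by simp [h1]⟩
        have := PySem.List.max?_isMax hmax (u.2.1) (List.mem_map_of_mem hu')
        simpa using this
      rw [List.foldl_append, List.foldl_cons, List.foldl_nil, hfold, List.map_append]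
      simp only [List.map_cons, List.map_nil]
      rw [min?_append_singleton, hmin]
      rcases lt_trichotomy t.1 bs with hlt | heq | hgt
      · -- strictly smaller score: reset to the new triple
        refine ⟨t.1, t.2.1, by simp [hlt], ?_, ?_⟩
        · have hfe : ts.filter (fun u => decide (u.1 = t.1)) = [] := by
            rw [List.filter_eq_nil_iff]
            intro u hu
            have := hminle u hu
            simp; omega
          rw [List.filter_append, hfe]
          simp [PySem.List.max?]
        · have hfe2 : ts.filter (fun u => decide (u.1 = t.1 ∧ u.2.1 = t.2.1)) = [] := by
            rw [List.filter_eq_nil_iff]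
            intro u hu
            have := hminle u hu
            simp; omega
          rw [List.filter_append, hfe2]
          simp [selStep, hlt]
      · -- equal score
        rw [heq]
        rcases lt_trichotomy bw t.2.1 with hw | hweq | hw
        · -- strictly larger weight: reset
          refine ⟨bs, t.2.1, by simp, ?_, ?_⟩
          · rw [List.filter_append]
            have hft : List.filter (fun u => decide (u.1 = bs)) [t] = [t] := by simp [heq]
            rw [hft, List.map_append]
            simp only [List.map_cons, List.map_nil]
            rw [max?_append_singleton, hmax]
            simp [hw]
          · have hfe2 : ts.filter (fun u => decide (u.1 = bs ∧ u.2.1 = t.2.1)) = [] := by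
              rw [List.filter_eq_nil_iff]
              intro u hu
              have := hmaxle u hu
              simp
              intro h1
              have := this h1
              omega
            rw [List.filter_append, hfe2]
            simp [selStep, heq, hw]
        · -- tie: append the vertex
          refine ⟨bs, bw, by simp, ?_, ?_⟩
          · rw [List.filter_append]
            have hft : List.filter (fun u => decide (u.1 = bs)) [t] = [t] := by simp [heq]
            rw [hft, List.map_append]
            simp only [List.map_cons, List.map_nil]
            rw [max?_append_singleton, hmax]
            simp [hweq]
          · rw [List.filter_append, List.map_append]
            simp [selStep, heq, hweq]
        · -- smaller weight: unchanged
          refine ⟨bs, bw, by simp, ?_, ?_⟩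
          · rw [List.filter_append]
            have hft : List.filter (fun u => decide (u.1 = bs)) [t] = [t] := by simp [heq]
            rw [hft, List.map_append]
            simp only [List.map_cons, List.map_nil]
            rw [max?_append_singleton, hmax]
            simp
            omega
          · rw [List.filter_append]
            have hf1 : List.filter (fun u => decide (u.1 = bs ∧ u.2.1 = bw)) [t] = [] := by
              simp; omega
            rw [hf1]
            have hnl : ¬ bw < t.2.1 := not_lt.2 (le_of_lt hw)
            have hne2 : bw ≠ t.2.1 := ne_of_gt hw
            simp [selStep, hnl, hne2, heq]
      · -- strictly larger score: unchanged
        refine ⟨bs, bw, by simp [not_lt.2 (le_of_lt hgt)], ?_, ?_⟩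
        · rw [List.filter_append]
          have hf1 : List.filter (fun u => decide (u.1 = bs)) [t] = [] := by
            simp; omega
          rw [hf1, List.append_nil]
          exact hmax
        · rw [List.filter_append]
          have hf1 : List.filter (fun u => decide (u.1 = bs ∧ u.2.1 = bw)) [t] = [] := by
            simp; omega
          rw [hf1, List.append_nil]
          have hne3 : bs ≠ t.1 := ne_of_lt hgt
          have hnl : ¬ bs > t.1 := not_lt.2 (le_of_lt hgt)
          simp [selStep, hne3, hnl]
lemma sel_foldl : ∀ (ts : List (Int × Int × Int)),
    (ts.foldl selStep (none, ([] : List Int))).2 =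
      (if ts = [] then []
       else
        match PySem.List.min? (ts.map (·.1)) id with
        | none => []
        | some bs =>
          match PySem.List.max? ((ts.filter (fun t => decide (t.1 = bs))).map (fun t => t.2.1)) id with
          | none => []
          | some bw => (ts.filter (fun t => decide (t.1 = bs ∧ t.2.1 = bw))).map (fun t => t.2.2)) := by
  intro ts
  rcases eq_or_ne ts [] with rfl | hne
  · rfl
  · obtain ⟨bs, bw, hmin, hmax, hfold⟩ := sel_invariant ts hne
    rw [if_neg hne, hmin]
    simp [hfold, hmax]


-- ===== VERDICT (by name: the statement is the Claim_ definition above) =====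
theorem most_crucial_spec : Claim_equal_most_crucial := by
  intro a _v _
  simp only [Spec_most_crucial, most_crucial, most_crucial_alt]
  have hfun : ufOuterStep (a.length + 1) a (PySem.Dict.ofList _v) =
      fun st v => selStep st (altTriple a (PySem.Dict.ofList _v) v) :=
    funext fun st => funext fun v => outer_step_eq a (PySem.Dict.ofList _v) st v
  rw [hfun, ← List.foldl_map, sel_foldl]
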